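-- pv_equiv track=rewrite | github.com/slackbotai/slack-bot | source/channelreader.py | order_messages_keys
-- ===== SOURCE A (Python) =====
-- from collections import OrderedDict
--
-- def order_messages_keys(messages: list, key_order: list) -> list:
--     """
--     Reorder the keys in each message in a list of messages based on a
--     specified key order. Keys not in the specified order will be added
--     at the end in their original order.
--
--     Args:
--         messages (list): A list of dictionaries representing messages.
--         key_order (list): The desired order of keys.
--
--     Returns:
--         list: Messages with keys reordered.
--
--     Raises:
--         ValueError: If input messages or key_order are invalid.
--     """
--     # Validate input types
--     if not isinstance(
--         messages, list) or not all(isinstance(m, dict) for m in messages):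
--         raise ValueError(
--             "The 'messages' argument must be a list of dictionaries."
--         )
--     if not isinstance(
--         key_order, list) or not all(isinstance(k, str) for k in key_order):
--         raise ValueError(
--             "The 'key_order' argument must be a list of strings."
--         )
--
--     ordered_messages = []
--
--     # Iterate over each message in the provided list
--     for message in messages:
--         # Create an ordered dictionary for the specified key order
--         ordered_message = OrderedDict()
--
--         # Add keys from key_order that exist in the message
--         for key in key_order:
--             if key in message:
--                 ordered_message[key] = message[key]
--
--         # Add remaining keys that are not in the key_order
--         for key in message:
--             if key not in ordered_message:
--                 ordered_message[key] = message[key]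
--
--         ordered_messages.append(ordered_message)
--
--     return ordered_messages
-- ===== SOURCE B (Python) =====
-- from collections import OrderedDict
--
--
-- def order_messages_keys(messages: list, key_order: list) -> list:
--     """Reorder each message's keys: keys in key_order first (in key_order's
--     order, first occurrence wins), then the remaining keys in original order.
--
--     Implementation: one rank table + a single decorate-sort per message,
--     instead of building each OrderedDict by repeated membership tests.
--     """
--     # Validate input types (same as the original)
--     if not isinstance(
--         messages, list) or not all(isinstance(m, dict) for m in messages):
--         raise ValueError(
--             "The 'messages' argument must be a list of dictionaries."
--         )
--     if not isinstance(
--         key_order, list) or not all(isinstance(k, str) for k in key_order):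
--         raise ValueError(
--             "The 'key_order' argument must be a list of strings."
--         )
--
--     # rank of a key = its first index in key_order
--     rank = {}
--     for i, k in enumerate(key_order):
--         rank.setdefault(k, i)
--     n = len(key_order)
--
--     ordered_messages = []
--     for message in messages:
--         # keys present in key_order sort to the front by their rank (< n);
--         # all other items keep their original position via the n + i key
--         decorated = sorted(enumerate(message.items()),
--                            key=lambda p: rank.get(p[1][0], n + p[0]))
--         ordered_messages.append(OrderedDict(kv for _, kv in decorated))
--     return ordered_messages
-- ===== Notes on version B (the rewrite author's own statement) =====
-- stated objective: faster
-- what changed: Instead of building each OrderedDict by re-scanning all of key_order per message, B precomputes one first-occurrence rank table for key_order and produces each message by a single decorate-sort of its items keyed by rank (keys not in key_order fall back to n + original position).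
import Mathlib
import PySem

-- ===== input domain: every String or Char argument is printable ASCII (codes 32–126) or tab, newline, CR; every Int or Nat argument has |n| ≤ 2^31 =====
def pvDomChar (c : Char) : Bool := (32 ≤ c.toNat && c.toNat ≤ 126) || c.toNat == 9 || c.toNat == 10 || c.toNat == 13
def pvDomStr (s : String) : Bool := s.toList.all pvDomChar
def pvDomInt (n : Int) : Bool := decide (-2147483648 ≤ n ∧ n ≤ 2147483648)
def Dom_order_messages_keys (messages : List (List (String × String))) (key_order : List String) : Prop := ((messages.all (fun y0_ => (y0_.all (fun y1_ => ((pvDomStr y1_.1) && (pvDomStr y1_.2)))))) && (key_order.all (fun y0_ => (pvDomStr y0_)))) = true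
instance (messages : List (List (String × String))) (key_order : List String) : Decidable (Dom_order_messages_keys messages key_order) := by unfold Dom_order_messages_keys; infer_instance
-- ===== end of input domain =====

-- B replaces A's per-message OrderedDict building (a rescan of all of key_order per
-- message) by one precomputed first-occurrence rank table and a single decorate-sort
-- of each message's items (objective: faster; measured faster in a timing run).

-- ===== PORT A =====
-- A's messages are dicts; each is the association list of its items (unique keys, see Pre_).
def order_messages_keys (messages : List (List (String × String))) (key_order : List String) : List (List (String × String)) :=
  messages.foldl (fun ordered_messages message =>
    -- ordered_message = OrderedDict(); for key in key_order: if key in message: ordered_message[key] = message[key]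
    let om1 : PySem.Dict String String :=
      key_order.foldl (fun om key =>
        match (PySem.Dict.mk message).get? key with
        | some v => om.insert key v
        | none => om) PySem.Dict.empty
    -- for key in message: if key not in ordered_message: ordered_message[key] = message[key]
    let om2 : PySem.Dict String String :=
      message.foldl (fun om p =>
        if om.contains p.1 then om else om.insert p.1 p.2) om1
    ordered_messages ++ [om2.items]) []

-- ===== PORT B =====
-- rank = {}; for i, k in enumerate(key_order): rank.setdefault(k, i); n = len(key_order)
-- per message: sorted(enumerate(message.items()), key=lambda p: rank.get(p[1][0], n + p[0])),
-- then OrderedDict of the undecorated items (keys are unique under Pre_, so that is the list itself).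
def order_messages_keys_alt (messages : List (List (String × String))) (key_order : List String) : List (List (String × String)) :=
  let rank : PySem.Dict String Int :=
    (PySem.List.enumerate key_order).foldl (fun d p => d.setdefault p.2 p.1) PySem.Dict.empty
  let n : Int := key_order.length
  messages.map (fun message =>
    (PySem.List.sorted (PySem.List.enumerate message)
        (fun p => rank.getD p.2.1 (n + p.1)) false).map (·.2))

-- ===== PRECONDITION & SPEC =====
-- Pre_ excludes only association lists that carry a duplicate key inside one message:
-- those do not encode a Python dict (A's messages are dicts), so no dict input is lost.
def Pre_order_messages_keys (messages : List (List (String × String))) (key_order : List String) : Prop :=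
  ∀ m ∈ messages, (m.map Prod.fst).Nodup
instance (messages : List (List (String × String))) (key_order : List String) : Decidable (Pre_order_messages_keys messages key_order) := by unfold Pre_order_messages_keys; infer_instance
def pvWitness_order_messages_keys : (List (List (String × String))) × List String :=
  ([[("a", "1"), ("b", "2")], [("c", "3")]], ["b", "x", "b"])
def Spec_order_messages_keys (messages : List (List (String × String))) (key_order : List String) (out : List (List (String × String))) : Prop := out = order_messages_keys_alt messages key_order
instance (messages : List (List (String × String))) (key_order : List String) (out : List (List (String × String))) : Decidable (Spec_order_messages_keys messages key_order out) := by unfold Spec_order_messages_keys; infer_instance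

-- ===== CLAIM (what is proved, stated in full; the proofs are below) =====
def Claim_equal_order_messages_keys : Prop := ∀ (messages : List (List (String × String))) (key_order : List String), Dom_order_messages_keys messages key_order → Pre_order_messages_keys messages key_order → Spec_order_messages_keys messages key_order (order_messages_keys messages key_order)

-- ===== LEMMAS AND PROOFS =====

-- keys of `key_order` that occur in message `ms` and are not yet in `seen`, in first-occurrence order
def pvNewKeys (ms : List (String × String)) : List String → List String → List String
  | [], _ => []
  | k :: ks, seen =>
    if (PySem.Dict.mk ms).contains k ∧ k ∉ seen then k :: pvNewKeys ms ks (seen ++ [k])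
    else pvNewKeys ms ks seen

-- the value the message's dict stores at k
def pvVal (ms : List (String × String)) (k : String) : String :=
  ((PySem.Dict.mk ms).get? k).getD ""

-- the item of enumerate(ms) whose key is k
def pvDecOf (ms : List (String × String)) (k : String) : Int × (String × String) :=
  (((ms.map Prod.fst).idxOf k : Int), (k, pvVal ms k))

lemma pv_insert_noop {d : PySem.Dict String String} {k v} (hnd : d.keys.Nodup)
    (h : (k, v) ∈ d.items) : d.insert k v = d := by
  have hc : d.contains k = true := by
    rw [PySem.Dict.contains_iff_mem_keys]
    exact PySem.Dict.mem_keys_of_mem_items d h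
  apply PySem.Dict.ext
  rw [PySem.Dict.items_insert_of_contains d v hc]
  have hget : d.get? k = some v := PySem.Dict.get?_of_mem_items d h hnd
  refine (List.map_congr_left ?_).trans (List.map_id _)
  intro p hp
  by_cases hpk : p.1 = k
  · have h2 : d.get? p.1 = some p.2 := PySem.Dict.get?_of_mem_items d hp hnd
    rw [hpk, hget] at h2
    cases p with
    | mk a b => simp only at hpk h2; subst hpk; simp [Option.some.injEq] at h2; simp [h2]
  · simp [hpk]

lemma pv_fold1_items (ms : List (String × String)) :
    ∀ (ks : List String) (d : PySem.Dict String String), d.keys.Nodup →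
      (∀ p ∈ d.items, (PySem.Dict.mk ms).get? p.1 = some p.2) →
      (ks.foldl (fun om key =>
        match (PySem.Dict.mk ms).get? key with
        | some v => om.insert key v
        | none => om) d).items
      = d.items ++ (pvNewKeys ms ks d.keys).map (fun k => (k, pvVal ms k)) := by
  intro ks
  induction ks with
  | nil => intro d _ _; simp [pvNewKeys]
  | cons k ks ih =>
    intro d hnd hagree
    simp only [List.foldl_cons]
    rcases hg : (PySem.Dict.mk ms).get? k with _ | v
    all_goals simp only []
    · -- key not in message
      have hc : (PySem.Dict.mk ms).contains k = false := by
        rw [PySem.Dict.contains_eq_isSome_get?, hg]; rfl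
      simp only [pvNewKeys, hc]
      exact ih d hnd hagree
    · have hc : (PySem.Dict.mk ms).contains k = true := by
        rw [PySem.Dict.contains_eq_isSome_get?, hg]; rfl
      by_cases hseen : k ∈ d.keys
      · -- overwrite with the same value: no-op
        obtain ⟨x, hx⟩ : ∃ x, (k, x) ∈ d.items := by simpa [PySem.Dict.keys] using hseen
        have hv : x = v := by
          have h2 := hagree (k, x) hx
          rw [hg] at h2
          exact ((Option.some.injEq _ _).mp h2).symm
        have hpkv : (k, v) ∈ d.items := by rw [← hv]; exact hx
        rw [pv_insert_noop hnd hpkv]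
        simp only [pvNewKeys, hc, hseen, not_true_eq_false, and_false]
        exact ih d hnd hagree
      · -- fresh key: appended
        have hcd : d.contains k = false := by
          by_contra hx
          exact hseen ((PySem.Dict.contains_iff_mem_keys d k).mp (by simpa using Bool.of_not_eq_false hx))
        have hkeys' : (d.insert k v).keys = d.keys ++ [k] :=
          PySem.Dict.keys_insert_of_not_contains d v hcd
        have hitems' : (d.insert k v).items = d.items ++ [(k, v)] :=
          PySem.Dict.items_insert_of_not_contains d v hcd
        have hnd' : (d.insert k v).keys.Nodup := by
          rw [hkeys']
          refine List.Nodup.append hnd (List.nodup_singleton k) ?_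
          intro a ha hb
          rw [List.mem_singleton] at hb
          exact hseen (hb ▸ ha)
        have hagree' : ∀ p ∈ (d.insert k v).items, (PySem.Dict.mk ms).get? p.1 = some p.2 := by
          intro p hp
          rw [hitems'] at hp
          rcases List.mem_append.mp hp with h | h
          · exact hagree p h
          · simp at h; subst h; exact hg
        have := ih (d.insert k v) hnd' hagree'
        rw [this, hitems', hkeys']
        simp only [pvNewKeys, hc, hseen, not_false_eq_true, and_true, if_true,
          List.map_cons, List.append_assoc, List.cons_append, List.nil_append]
        congr 2
        simp [pvVal, hg]

lemma pv_fold2_items :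
    ∀ (rest : List (String × String)) (om : PySem.Dict String String),
      (rest.map Prod.fst).Nodup →
      (rest.foldl (fun om p => if om.contains p.1 then om else om.insert p.1 p.2) om).items
      = om.items ++ rest.filter (fun p => !om.contains p.1) := by
  intro rest
  induction rest with
  | nil => intro om _; simp
  | cons p rest ih =>
    intro om hnd
    have hnd' : (rest.map Prod.fst).Nodup := (List.nodup_cons.mp (by simpa using hnd)).2
    have hp1 : p.1 ∉ rest.map Prod.fst := (List.nodup_cons.mp (by simpa using hnd)).1
    simp only [List.foldl_cons]
    by_cases hc : om.contains p.1
    · simp only [hc, if_true, List.filter_cons, Bool.not_true, ih om hnd']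
      simp
    · have hcf : om.contains p.1 = false := by simpa using hc
      simp only [hcf, Bool.false_eq_true, if_false]
      rw [ih (om.insert p.1 p.2) hnd']
      rw [PySem.Dict.items_insert_of_not_contains om p.2 hcf]
      have hfc : rest.filter (fun q => !(om.insert p.1 p.2).contains q.1)
          = rest.filter (fun q => !om.contains q.1) := by
        apply List.filter_congr
        intro q hq
        have hne : q.1 ≠ p.1 := by
          intro h
          exact hp1 (h ▸ List.mem_map_of_mem hq)
        rw [PySem.Dict.contains_insert]
        simp [hne]
      rw [hfc]
      simp [hcf]



lemma pv_idxOf_cons_ne {a k' : String} (ks : List String) (h : a ≠ k') :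
    (k' :: ks).idxOf a = ks.idxOf a + 1 := by
  simp [Ne.symm h]

lemma pv_mem_newKeys (ms : List (String × String)) :
    ∀ (ks seen : List String) (k : String),
      k ∈ pvNewKeys ms ks seen ↔ k ∈ ks ∧ (PySem.Dict.mk ms).contains k ∧ k ∉ seen := by
  intro ks
  induction ks with
  | nil => intro seen k; simp [pvNewKeys]
  | cons k' ks ih =>
    intro seen k
    by_cases hc : (PySem.Dict.mk ms).contains k' ∧ k' ∉ seen
    · rw [pvNewKeys, if_pos hc]
      simp only [List.mem_cons, ih]
      constructor
      · rintro (rfl | ⟨h1, h2, h3⟩)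
        · exact ⟨Or.inl rfl, hc.1, hc.2⟩
        · refine ⟨Or.inr h1, h2, fun hk => h3 (List.mem_append_left _ hk)⟩
      · rintro ⟨h1, h2, h3⟩
        by_cases hk : k = k'
        · exact Or.inl hk
        · rcases h1 with rfl | h1'
          · exact Or.inl rfl
          · refine Or.inr ⟨h1', h2, ?_⟩
            intro hs
            rcases List.mem_append.mp hs with hs | hs
            · exact h3 hs
            · exact hk (List.mem_singleton.mp hs)
    · rw [pvNewKeys, if_neg hc]
      rw [ih]
      constructor
      · rintro ⟨h1, h2, h3⟩
        exact ⟨List.mem_cons_of_mem _ h1, h2, h3⟩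
      · rintro ⟨h1, h2, h3⟩
        rcases List.mem_cons.mp h1 with rfl | h1'
        · exact absurd ⟨h2, h3⟩ hc
        · exact ⟨h1', h2, h3⟩

lemma pv_newKeys_pairwise (ms : List (String × String)) :
    ∀ (ks seen : List String),
      (pvNewKeys ms ks seen).Pairwise (fun a b => ks.idxOf a < ks.idxOf b) := by
  intro ks
  induction ks with
  | nil => intro seen; simp [pvNewKeys]
  | cons k' ks ih =>
    intro seen
    have hlift : ∀ seen', (∀ x ∈ pvNewKeys ms ks seen', x ≠ k') →
        (pvNewKeys ms ks seen').Pairwise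
          (fun a b => (k' :: ks).idxOf a < (k' :: ks).idxOf b) := by
      intro seen' hno
      refine List.Pairwise.imp_of_mem ?_ (ih seen')
      intro a b ha hb hab
      rw [pv_idxOf_cons_ne ks (hno a ha), pv_idxOf_cons_ne ks (hno b hb)]
      omega
    by_cases hc : (PySem.Dict.mk ms).contains k' ∧ k' ∉ seen
    · rw [pvNewKeys, if_pos hc]
      have hno : ∀ x ∈ pvNewKeys ms ks (seen ++ [k']), x ≠ k' := by
        intro x hx h
        have := ((pv_mem_newKeys ms ks (seen ++ [k']) x).mp hx).2.2
        exact this (h ▸ List.mem_append_right _ (List.mem_singleton_self _))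
      refine List.Pairwise.cons ?_ (hlift (seen ++ [k']) hno)
      intro b hb
      rw [show (k' :: ks).idxOf k' = 0 by simp, pv_idxOf_cons_ne ks (hno b hb)]
      omega
    · rw [pvNewKeys, if_neg hc]
      refine hlift seen ?_
      intro x hx h
      obtain ⟨-, h2, h3⟩ := (pv_mem_newKeys ms ks seen x).mp hx
      subst h
      exact hc ⟨h2, h3⟩

lemma pv_newKeys_nodup (ms : List (String × String)) (ks seen : List String) :
    (pvNewKeys ms ks seen).Nodup := by
  refine List.Pairwise.imp_of_mem ?_ (pv_newKeys_pairwise ms ks seen)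
  intro a b _ _ hab h
  subst h
  omega

lemma pv_rank_getD (k : String) (dflt : Int) :
    ∀ (ks : List String) (j : Int) (d : PySem.Dict String Int),
      ((PySem.List.enumerate ks j).foldl (fun d p => d.setdefault p.2 p.1) d).getD k dflt
      = if d.contains k then d.getD k dflt
        else if k ∈ ks then j + (ks.idxOf k : Int) else dflt := by
  intro ks
  induction ks with
  | nil =>
    intro j d
    simp only [PySem.List.enumerate, List.foldl_nil, List.not_mem_nil, if_false]
    by_cases h : d.contains k
    · rw [if_pos h]
    · rw [if_neg h, PySem.Dict.getD_of_not_contains d dflt (by simpa using h)]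
  | cons k' ks ih =>
    intro j d
    rw [PySem.List.enumerate_cons, List.foldl_cons]
    rw [ih (j + 1) (d.setdefault k' j)]
    by_cases hdk : d.contains k = true
    · have h1 : (d.setdefault k' j).contains k = true := by
        rw [PySem.Dict.contains_setdefault]; simp [hdk]
      rw [if_pos h1, if_pos hdk]
      by_cases hkk' : k = k'
      · subst hkk'
        rw [PySem.Dict.getD_setdefault_self]
        rw [PySem.Dict.getD_eq_get?_getD, PySem.Dict.getD_eq_get?_getD]
        rw [PySem.Dict.contains_eq_isSome_get?] at hdk
        cases hg : d.get? k with
        | none => rw [hg] at hdk; simp at hdk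
        | some v => simp
      · rw [PySem.Dict.getD_eq_get?_getD, PySem.Dict.getD_eq_get?_getD,
          PySem.Dict.get?_setdefault_of_ne d j hkk']
    · have hdkf : d.contains k = false := by simpa using hdk
      rw [if_neg hdk]
      by_cases hkk' : k = k'
      · subst hkk'
        have hset : d.setdefault k j = d.insert k j := PySem.Dict.setdefault_of_not_contains d j hdkf
        have h1 : (d.setdefault k j).contains k = true := by
          rw [PySem.Dict.contains_setdefault]; simp
        rw [if_pos h1, hset, PySem.Dict.getD_eq_get?_getD, PySem.Dict.get?_insert_self]
        simp
      · have h1 : (d.setdefault k' j).contains k = false := by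
          rw [PySem.Dict.contains_setdefault]; simp [hkk', hdkf]
        rw [if_neg (by simp [h1])]
        by_cases hks : k ∈ ks
        · rw [if_pos hks, if_pos (List.mem_cons_of_mem _ hks)]
          have : (k' :: ks).idxOf k = ks.idxOf k + 1 := by
            simp [Ne.symm hkk']
          rw [this]
          push_cast
          ring
        · rw [if_neg hks, if_neg (by simp [hkk', hks])]

lemma pv_enum_elem (ms : List (String × String)) (hnd : (ms.map Prod.fst).Nodup) :
    ∀ p ∈ PySem.List.enumerate ms, p = pvDecOf ms p.2.1 ∧ p.2.1 ∈ ms.map Prod.fst := by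
  intro p hp
  obtain ⟨i, hi, rfl⟩ := (PySem.List.mem_enumerate_iff ms 0 p).mp hp
  have hlen : i < (ms.map Prod.fst).length := by simpa using hi
  have hkey : (ms.map Prod.fst)[i] = ms[i].1 := by simp
  have hidx : (ms.map Prod.fst).idxOf ms[i].1 = i := by
    rw [← hkey]; exact List.Nodup.idxOf_getElem hnd i hlen
  have hmem : ms[i] ∈ ms := List.getElem_mem hi
  have hget : (PySem.Dict.mk ms).get? ms[i].1 = some ms[i].2 := by
    refine PySem.Dict.get?_of_mem_items _ ?_ (by simpa [PySem.Dict.keys] using hnd)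
    simp [hmem]
  constructor
  · simp only [pvDecOf, hidx, pvVal, hget, Option.getD_some]
    simp
  · rw [← hkey]; exact List.getElem_mem hlen

lemma pv_decOf_mem (ms : List (String × String)) (hnd : (ms.map Prod.fst).Nodup) :
    ∀ k ∈ ms.map Prod.fst, pvDecOf ms k ∈ PySem.List.enumerate ms := by
  intro k hk
  have hlt : (ms.map Prod.fst).idxOf k < (ms.map Prod.fst).length := List.idxOf_lt_length_of_mem hk
  set i := (ms.map Prod.fst).idxOf k with hi
  have hlen : i < ms.length := by simpa using hlt
  have hkey : ms[i].1 = k := by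
    have h1 : (ms.map Prod.fst)[i]'hlt = k := List.getElem_idxOf hlt
    rwa [List.getElem_map] at h1
  have hval : pvVal ms k = ms[i].2 := by
    have hmem : ms[i] ∈ ms := List.getElem_mem hlen
    have hget : (PySem.Dict.mk ms).get? ms[i].1 = some ms[i].2 := by
      refine PySem.Dict.get?_of_mem_items _ ?_ (by simpa [PySem.Dict.keys] using hnd)
      simp [hmem]
    rw [pvVal, ← hkey, hget, Option.getD_some]
  rw [(PySem.List.mem_enumerate_iff ms 0 _)]
  refine ⟨i, hlen, ?_⟩
  simp only [pvDecOf, hval, ← hi]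
  rw [zero_add]
  rw [show (k, ms[i].2) = ms[i] by rw [← hkey]]

lemma pv_B_one (ms : List (String × String)) (ko : List String) (hnd : (ms.map Prod.fst).Nodup) :
    PySem.List.sorted (PySem.List.enumerate ms)
      (fun p => ((PySem.List.enumerate ko).foldl (fun d q => d.setdefault q.2 q.1)
          PySem.Dict.empty).getD p.2.1 ((ko.length : Int) + p.1)) false
    = (pvNewKeys ms ko []).map (pvDecOf ms)
      ++ (PySem.List.enumerate ms).filter (fun p => !decide (p.2.1 ∈ ko)) := by
  set rank := (PySem.List.enumerate ko).foldl (fun d q => d.setdefault q.2 q.1) PySem.Dict.empty with hrank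
  set f : Int × (String × String) → Int := fun p => rank.getD p.2.1 ((ko.length : Int) + p.1) with hf
  have hmemnk : ∀ k, k ∈ pvNewKeys ms ko [] ↔ k ∈ ko ∧ k ∈ ms.map Prod.fst := by
    intro k
    rw [pv_mem_newKeys, PySem.Dict.contains_iff_mem_keys]
    simp [PySem.Dict.keys]
  have hrank_in : ∀ (k : String) (dflt : Int), k ∈ ko → rank.getD k dflt = (ko.idxOf k : Int) := by
    intro k dflt hk
    rw [hrank, pv_rank_getD k dflt ko 0 PySem.Dict.empty]
    simp [hk]
  have hrank_out : ∀ (k : String) (dflt : Int), k ∉ ko → rank.getD k dflt = dflt := by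
    intro k dflt hk
    rw [hrank, pv_rank_getD k dflt ko 0 PySem.Dict.empty]
    simp [hk]
  have hnd_enum : (PySem.List.enumerate ms).Nodup := by
    refine List.Pairwise.imp_of_mem ?_ (PySem.List.pairwise_lt_enumerate ms 0)
    intro a b _ _ hab h
    subst h
    omega
  have hnd1 : ((pvNewKeys ms ko []).map (pvDecOf ms)).Nodup := by
    refine List.Nodup.map_on ?_ (pv_newKeys_nodup ms ko [])
    intro x _ y _ hxy
    have := congrArg (fun p => p.2.1) hxy
    simpa [pvDecOf] using this
  have hpart1 : ((pvNewKeys ms ko []).map (pvDecOf ms)).Perm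
      ((PySem.List.enumerate ms).filter (fun p => decide (p.2.1 ∈ ko))) := by
    refine (List.perm_ext_iff_of_nodup hnd1 (List.Nodup.filter _ hnd_enum)).mpr ?_
    intro x
    rw [List.mem_filter, List.mem_map]
    constructor
    · rintro ⟨k, hk, rfl⟩
      obtain ⟨hko, hmk⟩ := (hmemnk k).mp hk
      refine ⟨pv_decOf_mem ms hnd k hmk, by simpa [pvDecOf] using hko⟩
    · rintro ⟨hx, hpred⟩
      obtain ⟨hdec, hmk⟩ := pv_enum_elem ms hnd x hx
      refine ⟨x.2.1, (hmemnk _).mpr ⟨by simpa using hpred, hmk⟩, hdec.symm⟩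
  have hperm : ((pvNewKeys ms ko []).map (pvDecOf ms)
      ++ (PySem.List.enumerate ms).filter (fun p => !decide (p.2.1 ∈ ko))).Perm
      (PySem.List.enumerate ms) :=
    (hpart1.append (List.Perm.refl _)).trans
      (List.filter_append_perm (fun p : Int × (String × String) => decide (p.2.1 ∈ ko)) _)
  have hfval1 : ∀ k ∈ pvNewKeys ms ko [], f (pvDecOf ms k) = (ko.idxOf k : Int) := by
    intro k hk
    obtain ⟨hko, _⟩ := (hmemnk k).mp hk
    simp only [hf, pvDecOf]
    exact hrank_in k _ hko
  have hpw1 : ((pvNewKeys ms ko []).map (pvDecOf ms)).Pairwise (fun a b => f a < f b) := by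
    rw [List.pairwise_map]
    refine List.Pairwise.imp_of_mem ?_ (pv_newKeys_pairwise ms ko [])
    intro a b ha hb hab
    rw [hfval1 a ha, hfval1 b hb]
    exact_mod_cast hab
  have hpw2 : ((PySem.List.enumerate ms).filter (fun p => !decide (p.2.1 ∈ ko))).Pairwise
      (fun a b => f a < f b) := by
    refine List.Pairwise.imp_of_mem ?_
      (List.Pairwise.filter _ (PySem.List.pairwise_lt_enumerate ms 0))
    intro a b ha hb hab
    have hano : a.2.1 ∉ ko := by simpa using (List.mem_filter.mp ha).2
    have hbno : b.2.1 ∉ ko := by simpa using (List.mem_filter.mp hb).2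
    simp only [hf]
    rw [hrank_out _ _ hano, hrank_out _ _ hbno]
    omega
  have hcross : ∀ a ∈ (pvNewKeys ms ko []).map (pvDecOf ms),
      ∀ b ∈ (PySem.List.enumerate ms).filter (fun p => !decide (p.2.1 ∈ ko)), f a < f b := by
    rintro a ha b hb
    obtain ⟨k, hk, rfl⟩ := List.mem_map.mp ha
    have hbno : b.2.1 ∉ ko := by simpa using (List.mem_filter.mp hb).2
    have hbenum := (List.mem_filter.mp hb).1
    obtain ⟨i, hi, rfl⟩ := (PySem.List.mem_enumerate_iff ms 0 b).mp hbenum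
    rw [hfval1 k hk]
    simp only [hf]
    rw [hrank_out _ _ (by simpa using hbno)]
    have hlt : ko.idxOf k < ko.length := List.idxOf_lt_length_of_mem ((hmemnk k).mp hk).1
    omega
  exact PySem.List.sorted_eq_of_perm_of_pairwise_lt _ _ f hperm
    (List.pairwise_append.mpr ⟨hpw1, hpw2, hcross⟩)

lemma pv_filter_snd (q : String × String → Bool) :
    ∀ (l : List (Int × (String × String))),
      (l.filter (fun p => q p.2)).map (·.2) = (l.map (·.2)).filter q := by
  intro l
  induction l with
  | nil => rfl
  | cons x xs ih => by_cases h : q x.2 <;> simp [h, ih]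

lemma pv_A_one (ms : List (String × String)) (ko : List String)
    (hnd : (ms.map Prod.fst).Nodup) :
    (ms.foldl (fun om p => if om.contains p.1 then om else om.insert p.1 p.2)
       (ko.foldl (fun om key =>
         match (PySem.Dict.mk ms).get? key with
         | some v => om.insert key v
         | none => om) PySem.Dict.empty)).items
    = (pvNewKeys ms ko []).map (fun k => (k, pvVal ms k))
      ++ ms.filter (fun p => !decide (p.1 ∈ ko)) := by
  have hcontains : ∀ k, (PySem.Dict.mk ms).contains k = true ↔ k ∈ ms.map Prod.fst := by
    intro k
    rw [PySem.Dict.contains_iff_mem_keys]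
    simp [PySem.Dict.keys]
  have h1 := pv_fold1_items ms ko PySem.Dict.empty (by simp [PySem.Dict.keys_empty])
    (by intro p hp; simp [PySem.Dict.empty] at hp)
  rw [PySem.Dict.keys_empty] at h1
  set om1 := ko.foldl (fun om key =>
    match (PySem.Dict.mk ms).get? key with
    | some v => om.insert key v
    | none => om) PySem.Dict.empty with hom1
  have hempty : PySem.Dict.empty.items = ([] : List (String × String)) := rfl
  have hitems1 : om1.items = (pvNewKeys ms ko []).map (fun k => (k, pvVal ms k)) := by
    rw [h1, hempty, List.nil_append]
  have hkeys1 : om1.keys = pvNewKeys ms ko [] := by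
    simp only [PySem.Dict.keys, hitems1, List.map_map]
    exact List.map_id _
  rw [pv_fold2_items ms om1 hnd, hitems1]
  congr 1
  apply List.filter_congr
  intro p hp
  have hpk : p.1 ∈ ms.map Prod.fst := List.mem_map_of_mem hp
  rw [PySem.Dict.contains_eq_decide_mem_keys, hkeys1]
  congr 1
  apply decide_eq_decide.mpr
  rw [pv_mem_newKeys]
  simp only [List.not_mem_nil, not_false_eq_true, and_true, hcontains]
  exact ⟨fun h => h.1, fun h => ⟨h, hpk⟩⟩

lemma pv_msg (ms : List (String × String)) (ko : List String)
    (hnd : (ms.map Prod.fst).Nodup) :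
    (ms.foldl (fun om p => if om.contains p.1 then om else om.insert p.1 p.2)
       (ko.foldl (fun om key =>
         match (PySem.Dict.mk ms).get? key with
         | some v => om.insert key v
         | none => om) PySem.Dict.empty)).items
    = (PySem.List.sorted (PySem.List.enumerate ms)
        (fun p => ((PySem.List.enumerate ko).foldl (fun d q => d.setdefault q.2 q.1)
            PySem.Dict.empty).getD p.2.1 ((ko.length : Int) + p.1)) false).map (·.2) := by
  rw [pv_A_one ms ko hnd, pv_B_one ms ko hnd, List.map_append]
  congr 1
  · rw [List.map_map]
    exact List.map_congr_left fun k _ => rfl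
  · exact ((pv_filter_snd (fun q => !decide (q.1 ∈ ko)) (PySem.List.enumerate ms)).trans
      (congrArg (List.filter fun q => !decide (q.1 ∈ ko)) (PySem.List.map_snd_enumerate ms 0))).symm

lemma pv_outer (key_order : List String) :
    ∀ (messages : List (List (String × String))),
      (∀ m ∈ messages, (m.map Prod.fst).Nodup) →
      ∀ acc : List (List (String × String)),
      messages.foldl (fun ordered_messages message =>
        let om1 : PySem.Dict String String :=
          key_order.foldl (fun om key =>
            match (PySem.Dict.mk message).get? key with
            | some v => om.insert key v
            | none => om) PySem.Dict.empty
        let om2 : PySem.Dict String String :=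
          message.foldl (fun om p =>
            if om.contains p.1 then om else om.insert p.1 p.2) om1
        ordered_messages ++ [om2.items]) acc
      = acc ++ messages.map (fun message =>
          (PySem.List.sorted (PySem.List.enumerate message)
            (fun p => ((PySem.List.enumerate key_order).foldl
                (fun d q => d.setdefault q.2 q.1) PySem.Dict.empty).getD p.2.1
              ((key_order.length : Int) + p.1)) false).map (·.2)) := by
  intro messages
  induction messages with
  | nil => intro _ acc; simp
  | cons m rest ih =>
    intro hpre acc
    simp only [List.foldl_cons, List.map_cons]
    rw [ih (fun x hx => hpre x (List.mem_cons_of_mem _ hx))]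
    rw [pv_msg m key_order (hpre m List.mem_cons_self)]
    simp

-- ===== VERDICT (by name: the statement is the Claim_ definition above) =====
theorem order_messages_keys_spec : Claim_equal_order_messages_keys := by
  intro messages key_order _ hpre
  show order_messages_keys messages key_order = order_messages_keys_alt messages key_order
  rw [order_messages_keys, order_messages_keys_alt]
  exact (pv_outer key_order messages hpre []).trans (List.nil_append _)
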